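-- pv_equiv track=rewrite | github.com/algoritmiaUS/cp-problems | Codeforces/2025A.py | condicion
-- ===== SOURCE A (Python) =====
-- def condicion(s: str, t: str, mid: int) -> bool:
--     for k in range(len(s) + 1):  # Probar cada posible longitud de prefijo de s
--         # Encontrar el mayor prefijo común entre s[:k] y t
--         m = 0
--         while m < len(t) and m < k and s[m] == t[m]:
--             m += 1
--
--         # Calcular el tiempo total:
--         # 1. Escribir los primeros k caracteres de s
--         # 2. Copiar esos k caracteres a la otra pantalla
--         # 3. Escribir el resto de s y t
--         total = k + 1 + (len(s) - k) + (len(t) - m)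
--
--         if total <= mid:
--             return True
--     return False
-- ===== SOURCE B (Python) =====
-- def condicion(s: str, t: str, mid: int) -> bool:
--     # Compute the longest common prefix of s and t once; the best choice of k
--     # in A is any k >= L, giving total = 1 + len(s) + len(t) - L.
--     L = 0
--     for a, b in zip(s, t):
--         if a != b:
--             break
--         L += 1
--     return 1 + len(s) + len(t) - L <= mid
-- ===== Notes on version B (the rewrite author's own statement) =====
-- stated objective: faster
-- what changed: Replaces the loop over every prefix length k (each with an inner common-prefix scan) by a single longest-common-prefix computation L and the closed-form test 1+len(s)+len(t)-L <= mid.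
import Mathlib
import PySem

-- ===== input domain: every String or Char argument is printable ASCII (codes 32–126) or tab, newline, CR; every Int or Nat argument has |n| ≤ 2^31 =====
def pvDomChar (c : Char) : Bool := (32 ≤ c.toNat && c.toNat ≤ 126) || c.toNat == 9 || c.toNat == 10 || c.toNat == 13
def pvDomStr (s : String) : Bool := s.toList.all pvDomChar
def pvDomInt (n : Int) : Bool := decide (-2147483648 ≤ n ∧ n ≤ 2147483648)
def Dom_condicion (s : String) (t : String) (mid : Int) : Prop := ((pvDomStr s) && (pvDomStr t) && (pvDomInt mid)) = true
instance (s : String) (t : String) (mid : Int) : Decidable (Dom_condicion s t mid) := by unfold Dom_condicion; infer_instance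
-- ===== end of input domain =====

-- B replaces A's loop over all prefix lengths k (each with an inner prefix scan)
-- by one longest-common-prefix computation and a closed-form test (objective: faster).

-- ===== PORT A =====
-- the inner `while m < len(t) and m < k and s[m] == t[m]: m += 1`;
-- the guards ensure m is in range for both lists, so getD with a dummy default is exact
def pvWhileM (s t : List Char) (k : Nat) (m : Nat) : Nat :=
  if m < t.length ∧ m < k ∧ s.getD m ' ' = t.getD m ' ' then pvWhileM s t k (m + 1) else m
termination_by t.length - m
decreasing_by omega

def condicion (s : String) (t : String) (mid : Int) : Bool :=
  -- `for k in range(len(s)+1): … if total <= mid: return True` / `return False` = any over the range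
  (List.range (s.length + 1)).any (fun k =>
    let m := pvWhileM s.toList t.toList k 0
    decide ((k : Int) + 1 + ((s.length : Int) - k) + ((t.length : Int) - m) ≤ mid))

-- ===== PORT B =====
-- `L = 0; for a,b in zip(s,t): if a != b: break; L += 1`
def pvLcp (a b : List Char) : Nat :=
  match a, b with
  | x :: xs, y :: ys => if x = y then pvLcp xs ys + 1 else 0
  | _, _ => 0

def condicion_alt (s : String) (t : String) (mid : Int) : Bool :=
  decide (1 + (s.length : Int) + (t.length : Int) - (pvLcp s.toList t.toList : Int) ≤ mid)

-- ===== PRECONDITION & SPEC =====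
def Spec_condicion (s : String) (t : String) (mid : Int) (out : Bool) : Prop := out = condicion_alt s t mid
instance (s : String) (t : String) (mid : Int) (out : Bool) : Decidable (Spec_condicion s t mid out) := by unfold Spec_condicion; infer_instance

-- ===== CLAIM (what is proved, stated in full; the proofs are below) =====
def Claim_equal_condicion : Prop := ∀ (s : String) (t : String) (mid : Int), Dom_condicion s t mid → Spec_condicion s t mid (condicion s t mid)

-- ===== LEMMAS AND PROOFS =====

theorem pvLcp_le_left : ∀ (a b : List Char), pvLcp a b ≤ a.length := by
  intro a
  induction a with
  | nil => intro b; cases b <;> simp [pvLcp]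
  | cons x xs ih =>
    intro b
    cases b with
    | nil => simp [pvLcp]
    | cons y ys =>
      simp only [pvLcp]
      split
      · simpa using Nat.succ_le_succ (ih ys)
      · simp

theorem pvLcp_le_right : ∀ (a b : List Char), pvLcp a b ≤ b.length := by
  intro a
  induction a with
  | nil => intro b; cases b <;> simp [pvLcp]
  | cons x xs ih =>
    intro b
    cases b with
    | nil => simp [pvLcp]
    | cons y ys =>
      simp only [pvLcp]
      split
      · simpa using Nat.succ_le_succ (ih ys)
      · simp

theorem pvLcp_get : ∀ (a b : List Char) (i : Nat), i < pvLcp a b →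
    a.getD i ' ' = b.getD i ' ' := by
  intro a
  induction a with
  | nil => intro b i h; cases b <;> simp [pvLcp] at h
  | cons x xs ih =>
    intro b i h
    cases b with
    | nil => simp [pvLcp] at h
    | cons y ys =>
      simp only [pvLcp] at h
      split at h
      · rename_i hxy
        cases i with
        | zero => simpa using hxy
        | succ j => simpa using ih ys j (by omega)
      · omega

theorem pvLcp_stop : ∀ (a b : List Char), pvLcp a b < a.length → pvLcp a b < b.length →
    a.getD (pvLcp a b) ' ' ≠ b.getD (pvLcp a b) ' ' := by
  intro a
  induction a with
  | nil => intro b h1 h2; simp at h1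
  | cons x xs ih =>
    intro b h1 h2
    cases b with
    | nil => simp at h2
    | cons y ys =>
      by_cases hxy : x = y
      · have hL : pvLcp (x :: xs) (y :: ys) = pvLcp xs ys + 1 := by simp [pvLcp, hxy]
        rw [hL] at h1 h2 ⊢
        simp only [List.getD_cons_succ]
        exact ih ys (by simpa using h1) (by simpa using h2)
      · have hL : pvLcp (x :: xs) (y :: ys) = 0 := by simp [pvLcp, hxy]
        rw [hL]
        simpa using hxy

theorem pvWhileM_eq (s t : List Char) (k : Nat) (hk : k ≤ s.length) :
    ∀ (d : Nat) (m : Nat), m ≤ min k (pvLcp s t) → min k (pvLcp s t) - m ≤ d →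
      pvWhileM s t k m = min k (pvLcp s t) := by
  intro d
  induction d with
  | zero =>
    intro m hm hd
    have hm' : m = min k (pvLcp s t) := by omega
    subst hm'
    rw [pvWhileM]
    rw [if_neg]
    intro ⟨h1, h2, h3⟩
    -- m = min k L and m < k, so m = L < k; L < |t| by h1; and L < |s| since L < k ≤ |s|
    have hL : min k (pvLcp s t) = pvLcp s t := by omega
    rw [hL] at h1 h2 h3
    exact pvLcp_stop s t (by omega) h1 h3
  | succ n ih =>
    intro m hm hd
    by_cases hlt : m < min k (pvLcp s t)
    · rw [pvWhileM]
      rw [if_pos]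
      · exact ih (m + 1) (by omega) (by omega)
      · refine ⟨?_, by omega, pvLcp_get s t m (by omega)⟩
        have := pvLcp_le_right s t
        omega
    · exact ih m hm (by omega)

theorem pvWhileM_zero (s t : List Char) (k : Nat) (hk : k ≤ s.length) :
    pvWhileM s t k 0 = min k (pvLcp s t) :=
  pvWhileM_eq s t k hk (min k (pvLcp s t)) 0 (Nat.zero_le _) (by omega)

-- ===== VERDICT (by name: the statement is the Claim_ definition above) =====
theorem condicion_spec : Claim_equal_condicion := by
  intro s t mid _
  unfold Spec_condicion condicion condicion_alt
  set L := pvLcp s.toList t.toList with hLdef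
  have hLs : L ≤ s.toList.length := pvLcp_le_left _ _
  have hs : s.toList.length = s.length := by simp
  rw [Bool.eq_iff_iff]
  simp only [List.any_eq_true, List.mem_range, decide_eq_true_eq]
  constructor
  · rintro ⟨k, hk, hke⟩
    rw [pvWhileM_zero s.toList t.toList k (by omega)] at hke
    have hmin : (min k L : Int) ≤ (L : Int) := by
      have := Nat.min_le_right k L; exact_mod_cast this
    omega
  · intro h
    refine ⟨L, by omega, ?_⟩
    rw [pvWhileM_zero s.toList t.toList L (by omega), Nat.min_self]
    omega
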